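-- pv_equiv track=rewrite | github.com/ivan-14-trifonov/cloudtreasury | sql/parser.py | dict_to_cols
-- ===== SOURCE A (Python) =====
-- def dict_to_cols(data: list):
--     mysql_rows = []
--
--
--     for row in data:
--         string = ''
--         index = 1
--
--         if (index == 1):
--             string += "("
--
--         for column in row:
--
--
--
--             if (index % 3 == 0):
--                 string += str(column) + ')\n'
--             else:
--                 string += str(column) + ', '
--
--
--
--             index += 1
--         mysql_rows.append(string)
--
--
--     return mysql_rows
-- ===== SOURCE B (Python) =====
-- def dict_to_cols(data: list):
--     mysql_rows = []
--     for row in data: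
--         row = list(row)
--         s = '('
--         while row:
--             chunk, row = row[:3], row[3:]
--             if len(chunk) == 3:
--                 s += ', '.join(map(str, chunk)) + ')\n'
--             else:
--                 s += ', '.join(map(str, chunk)) + ', '
--         mysql_rows.append(s)
--     return mysql_rows
-- ===== Notes on version B (the rewrite author's own statement) =====
-- stated objective: alternative
-- what changed: B replaces A's element-by-element loop with a 1-based modulo-3 counter by a while loop that slices each row into chunks of three and appends ', '.join(chunk) plus ')\n' (full chunk) or ', ' (partial chunk).
import Mathlib
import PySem

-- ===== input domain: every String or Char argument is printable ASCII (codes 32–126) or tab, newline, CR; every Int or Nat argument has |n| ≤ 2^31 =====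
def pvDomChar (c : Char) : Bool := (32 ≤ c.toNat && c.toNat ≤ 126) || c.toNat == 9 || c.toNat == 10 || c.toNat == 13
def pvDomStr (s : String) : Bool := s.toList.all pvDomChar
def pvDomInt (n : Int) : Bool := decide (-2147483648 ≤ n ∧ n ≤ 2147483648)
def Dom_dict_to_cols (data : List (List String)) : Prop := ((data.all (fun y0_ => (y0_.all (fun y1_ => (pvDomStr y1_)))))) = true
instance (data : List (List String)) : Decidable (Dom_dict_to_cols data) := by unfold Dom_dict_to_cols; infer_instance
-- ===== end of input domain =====

-- B replaces A's per-element modulo-3 counter by a while loop that slices the row into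
-- chunks of three and joins each chunk with ', ' (objective: alternative decomposition).

-- ===== PORT A =====
-- A's inner loop body: every third column (index 1-based) is followed by ')\n', others by ', '.
-- index is always ≥ 1 here, so Lean's `%` (emod, divisor 3 > 0) agrees with Python's `%`.
def dictToColsStep (st : String × Int) (column : String) : String × Int :=
  if st.2 % 3 == 0 then (st.1 ++ (column ++ ")\n"), st.2 + 1)
  else (st.1 ++ (column ++ ", "), st.2 + 1)

def dict_to_cols (data : List (List String)) : List String :=
  data.foldl (fun mysql_rows row =>
    let string : String := ""
    let index : Int := 1
    let string := if index == 1 then string ++ "(" else string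
    mysql_rows ++ [(row.foldl dictToColsStep (string, index)).1]) []

-- ===== PORT B =====
-- Source B's while loop: chunk = row[:3], row = row[3:]; full chunks end ')\n', a partial chunk ends ', '.
def chunkLoop (s : String) (row : List String) : String :=
  if h : row = [] then s
  else
    let chunk := row.take 3
    let rest := row.drop 3
    if chunk.length == 3 then chunkLoop (s ++ (PySem.Str.join ", " chunk ++ ")\n")) rest
    else chunkLoop (s ++ (PySem.Str.join ", " chunk ++ ", ")) rest
termination_by row.length
decreasing_by
  all_goals
    have hp : 0 < row.length := List.length_pos_of_ne_nil h
    simp only [List.length_drop]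
    omega

def dict_to_cols_alt (data : List (List String)) : List String :=
  data.map (fun row => chunkLoop "(" row)

-- ===== PRECONDITION & SPEC =====
def Spec_dict_to_cols (data : List (List String)) (out : List String) : Prop := out = dict_to_cols_alt data
instance (data : List (List String)) (out : List String) : Decidable (Spec_dict_to_cols data out) := by unfold Spec_dict_to_cols; infer_instance

-- ===== CLAIM (what is proved, stated in full; the proofs are below) =====
def Claim_equal_dict_to_cols : Prop := ∀ (data : List (List String)), Dom_dict_to_cols data → Spec_dict_to_cols data (dict_to_cols data)

-- ===== LEMMAS AND PROOFS =====

lemma join_two (a b : String) : PySem.Str.join ", " [a, b] = a ++ (", " ++ b) := by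
  simp [PySem.Str.join, PySem.Chars.join, List.intercalate, ← String.toList_inj,
    String.toList_ofList, String.toList_append]

lemma join_three (a b c : String) :
    PySem.Str.join ", " [a, b, c] = a ++ (", " ++ (b ++ (", " ++ c))) := by
  simp [PySem.Str.join, PySem.Chars.join, List.intercalate, ← String.toList_inj,
    String.toList_ofList, String.toList_append]

lemma join_one (a : String) : PySem.Str.join ", " [a] = a := by
  simp [PySem.Str.join, PySem.Chars.join, List.intercalate]

lemma chunkLoop_nil (s : String) : chunkLoop s [] = s := by
  rw [chunkLoop]; simp

lemma str_eq_of_toList (a b : String) (h : a.toList = b.toList) : a = b :=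
  String.toList_inj.mp h

lemma inner_eq : ∀ (n : Nat) (row : List String), row.length ≤ n →
    ∀ (s : String) (i : Int), i % 3 = 1 →
    (row.foldl dictToColsStep (s, i)).1 = chunkLoop s row := by
  intro n
  induction n with
  | zero =>
    intro row hlen s i _
    have hr : row = [] := List.eq_nil_of_length_eq_zero (Nat.le_zero.mp hlen)
    subst hr
    simp [chunkLoop]
  | succ n ih =>
    intro row hlen s i hi
    have h0 : (i % 3 == 0) = false := by simp [hi]
    match row with
    | [] => simp [chunkLoop]
    | [a] =>
      rw [chunkLoop]
      simp [List.foldl, dictToColsStep, h0, join_one, chunkLoop_nil]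
    | [a, b] =>
      have h1 : ((i + 1) % 3 == 0) = false := by
        have : (i + 1) % 3 = 2 := by omega
        simp [this]
      rw [chunkLoop]
      simp [List.foldl, dictToColsStep, h0, h1, join_two, chunkLoop_nil,
        ← String.toList_inj, String.toList_append]
    | a :: b :: c :: rest =>
      have h1 : ((i + 1) % 3 == 0) = false := by
        have : (i + 1) % 3 = 2 := by omega
        simp [this]
      have h2 : ((i + 1 + 1) % 3 == 0) = true := by
        have : (i + 1 + 1) % 3 = 0 := by omega
        simp [this]
      have hrest : rest.length ≤ n := by
        simp only [List.length_cons] at hlen; omega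
      have hi3 : (i + 1 + 1 + 1) % 3 = 1 := by omega
      have lhs :
          ((a :: b :: c :: rest).foldl dictToColsStep (s, i)).1 =
          (rest.foldl dictToColsStep
            (s ++ (a ++ ", ") ++ (b ++ ", ") ++ (c ++ ")\n"), i + 1 + 1 + 1)).1 := by
        simp [List.foldl, dictToColsStep, h0, h1, h2]
      have hs : s ++ (a ++ ", ") ++ (b ++ ", ") ++ (c ++ ")\n")
          = s ++ (PySem.Str.join ", " [a, b, c] ++ ")\n") := by
        apply str_eq_of_toList
        simp [join_three, String.toList_append]
      have hr : chunkLoop s (a :: b :: c :: rest)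
          = chunkLoop (s ++ (PySem.Str.join ", " [a, b, c] ++ ")\n")) rest := by
        rw [chunkLoop]; simp
      rw [lhs, ih rest hrest _ _ hi3, hs, hr]

lemma foldl_append_map {α β : Type} (g : α → β) :
    ∀ (l : List α) (acc : List β),
      l.foldl (fun acc x => acc ++ [g x]) acc = acc ++ l.map g := by
  intro l
  induction l with
  | nil => simp
  | cons x xs ih => intro acc; simp [List.foldl, ih]

-- ===== VERDICT (by name: the statement is the Claim_ definition above) =====
theorem dict_to_cols_spec : Claim_equal_dict_to_cols := by
  intro data _
  unfold Spec_dict_to_cols dict_to_cols dict_to_cols_alt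
  rw [foldl_append_map (fun row => (row.foldl dictToColsStep
    (if (1 : Int) == 1 then ("" : String) ++ "(" else "", (1 : Int))).1) data []]
  simp only [List.nil_append]
  apply List.map_congr_left
  intro row _
  have h1 : (if (1 : Int) == 1 then ("" : String) ++ "(" else "") = "(" := by decide
  rw [h1]
  exact inner_eq row.length row le_rfl "(" 1 (by decide)
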